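-- pv_equiv track=rewrite | github.com/sparkyuniverzum/Sparky_universe | universe/limits.py | _resolve_module
-- ===== SOURCE A (Python) =====
-- from typing import Any, Dict, Iterable, Tuple
--
-- def _resolve_module(path: str, root_path: str, mount_map: Dict[str, str]) -> str | None:
--     root_path = root_path.rstrip("/")
--     if root_path and root_path in mount_map:
--         return mount_map[root_path]
--
--     if not path.startswith("/"):
--         path = "/" + path
--     for mount in sorted(mount_map.keys(), key=len, reverse=True):
--         if path == mount or path.startswith(f"{mount}/"):
--             return mount_map[mount]
--     return None
-- ===== SOURCE B (Python) =====
-- def _resolve_module(path, root_path, mount_map):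
--     root_path = root_path.rstrip("/")
--     if root_path and root_path in mount_map:
--         return mount_map[root_path]
--     if not path.startswith("/"):
--         path = "/" + path
--     # longest-prefix match: walk the path's '/'-prefixes from longest to shortest
--     cand = path
--     while True:
--         if cand in mount_map:
--             return mount_map[cand]
--         i = cand.rfind("/")
--         if i < 0:
--             return None
--         cand = cand[:i]
-- ===== Notes on version B (the rewrite author's own statement) =====
-- stated objective: faster
-- what changed: Instead of sorting all mount keys by length and scanning them, B walks the normalized path's '/'-prefixes from longest to shortest (trimming one trailing segment per step) and looks each prefix up in the dict, so the work depends on path depth, not on the number of mounts.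
import Mathlib
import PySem

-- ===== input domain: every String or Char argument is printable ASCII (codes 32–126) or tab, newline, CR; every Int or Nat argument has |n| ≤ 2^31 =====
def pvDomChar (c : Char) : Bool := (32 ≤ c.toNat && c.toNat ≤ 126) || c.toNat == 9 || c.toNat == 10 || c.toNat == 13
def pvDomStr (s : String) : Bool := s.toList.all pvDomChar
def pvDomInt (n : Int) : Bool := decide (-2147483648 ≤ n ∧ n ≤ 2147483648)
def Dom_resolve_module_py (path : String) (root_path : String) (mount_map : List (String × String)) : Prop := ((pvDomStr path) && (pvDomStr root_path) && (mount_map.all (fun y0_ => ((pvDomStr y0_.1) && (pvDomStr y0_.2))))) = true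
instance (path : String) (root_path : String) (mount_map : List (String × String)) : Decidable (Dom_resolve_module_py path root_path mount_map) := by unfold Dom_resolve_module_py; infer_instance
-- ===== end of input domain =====

-- B replaces A's sort-all-mounts-then-scan by a longest-prefix walk over the path itself,
-- trimming one trailing segment per step and looking each prefix up in the dict (objective: faster).

-- shared helpers of both ports: dict lookup on the association list (first match),
-- membership 'k in mount_map' is (pvLookup …).isSome, and str.rstrip("/")
def pvLookup (mount_map : List (String × String)) (k : List Char) : Option String :=
  (mount_map.find? (fun q => q.1.toList == k)).map (·.2)

-- exact port of root_path.rstrip("/"): drop trailing '/' characters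
def pvRstripSlash (s : List Char) : List Char :=
  (s.reverse.dropWhile (fun c => c == '/')).reverse

-- ===== PORT A =====
-- 'path == mount or path.startswith(mount + "/")'
def pvMatches (p m : List Char) : Bool :=
  p == m || PySem.Chars.startswith p (m ++ ['/'])

def resolve_module_py (path : String) (root_path : String) (mount_map : List (String × String)) : Option String :=
  let rp := pvRstripSlash root_path.toList
  if rp ≠ [] ∧ (pvLookup mount_map rp).isSome then pvLookup mount_map rp
  else
    let p := if PySem.Chars.startswith path.toList ['/'] then path.toList else '/' :: path.toList
    -- 'for mount in sorted(mount_map.keys(), key=len, reverse=True): …' with early return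
    match (PySem.List.sorted (PySem.List.dedup (mount_map.map (fun q => q.1.toList)))
            (fun k => k.length) true).find? (fun m => pvMatches p m) with
    | some m => pvLookup mount_map m
    | none => none

-- ===== PORT B =====
-- 'i = cand.rfind("/"); cand = cand[:i]' — none exactly when rfind returns -1
def pvTrim (cand : List Char) : Option (List Char) :=
  match cand.reverse.dropWhile (fun c => c ≠ '/') with
  | [] => none
  | _ :: rest => some rest.reverse

theorem pvTrim_lt {cand c : List Char} (h : pvTrim cand = some c) : c.length < cand.length := by
  unfold pvTrim at h
  rcases hd : cand.reverse.dropWhile (fun c => c ≠ '/') with _ | ⟨x, rest⟩ <;> rw [hd] at h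
  · simp at h
  · have hle := List.length_dropWhile_le (fun c => c ≠ '/') cand.reverse
    rw [hd] at hle
    simp only [Option.some.injEq] at h
    subst h
    simp at hle ⊢
    omega

-- the 'while True' loop of B
def pvDescend (mount_map : List (String × String)) (cand : List Char) : Option String :=
  match pvLookup mount_map cand with
  | some v => some v
  | none =>
    match h : pvTrim cand with
    | none => none
    | some c => pvDescend mount_map c
termination_by cand.length
decreasing_by exact pvTrim_lt h

def resolve_module_py_alt (path : String) (root_path : String) (mount_map : List (String × String)) : Option String :=
  let rp := pvRstripSlash root_path.toList
  if rp ≠ [] ∧ (pvLookup mount_map rp).isSome then pvLookup mount_map rp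
  else
    pvDescend mount_map
      (if PySem.Chars.startswith path.toList ['/'] then path.toList else '/' :: path.toList)

-- ===== PRECONDITION & SPEC =====
def Spec_resolve_module_py (path : String) (root_path : String) (mount_map : List (String × String)) (out : Option String) : Prop := out = resolve_module_py_alt path root_path mount_map
instance (path : String) (root_path : String) (mount_map : List (String × String)) (out : Option String) : Decidable (Spec_resolve_module_py path root_path mount_map out) := by unfold Spec_resolve_module_py; infer_instance

-- ===== CLAIM (what is proved, stated in full; the proofs are below) =====
def Claim_equal_resolve_module_py : Prop := ∀ (path : String) (root_path : String) (mount_map : List (String × String)), Dom_resolve_module_py path root_path mount_map → Spec_resolve_module_py path root_path mount_map (resolve_module_py path root_path mount_map)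

-- ===== LEMMAS AND PROOFS =====

-- the sequence of candidate prefixes B's loop inspects (proof-only)
def pvChain (cand : List Char) : List (List Char) :=
  cand ::
    (match h : pvTrim cand with
     | none => []
     | some c => pvChain c)
termination_by cand.length
decreasing_by exact pvTrim_lt h

theorem drop_head_slash (l : List Char) (x : Char) (rest : List Char)
    (h : l.dropWhile (fun c => decide (c ≠ '/')) = x :: rest) : x = '/' := by
  induction l with
  | nil => simp at h
  | cons a l ih =>
    by_cases ha : a = '/'
    · rw [List.dropWhile_cons] at h
      simp [ha] at h
      exact h.1.symm
    · rw [List.dropWhile_cons] at h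
      simp only [decide_not, ha, decide_false, Bool.not_false, if_true] at h
      simp only [ne_eq, decide_not] at ih
      exact ih h

theorem pvMatches_iff (p c : List Char) :
    pvMatches p c = true ↔ c = p ∨ (c ++ ['/']) <+: p := by
  unfold pvMatches
  rw [Bool.or_eq_true, beq_iff_eq, PySem.Chars.startswith_iff]
  constructor
  · rintro (h | h)
    · exact Or.inl h.symm
    · exact Or.inr h
  · rintro (h | h)
    · exact Or.inl h.symm
    · exact Or.inr h

theorem pvMatches_prefix {p c : List Char} (h : pvMatches p c = true) : c <+: p := by
  rcases (pvMatches_iff p c).1 h with h | h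
  · exact h ▸ List.prefix_refl _
  · exact ((c.prefix_append ['/']).trans h)

theorem pvTrim_none_spec {p : List Char} (h : pvTrim p = none) : ∀ x ∈ p, x ≠ '/' := by
  unfold pvTrim at h
  rcases hd : p.reverse.dropWhile (fun c => c ≠ '/') with _ | ⟨x, rest⟩ <;> rw [hd] at h
  · intro x hx
    have hx' : x ∈ p.reverse.takeWhile (fun c => decide (c ≠ '/')) := by
      have := List.takeWhile_append_dropWhile (p := fun c => decide (c ≠ '/')) (l := p.reverse)
      rw [hd, List.append_nil] at this
      rw [this]
      exact List.mem_reverse.2 hx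
    simpa using List.mem_takeWhile_imp hx'
  · simp at h

theorem pvTrim_some_spec {p q : List Char} (h : pvTrim p = some q) :
    ∃ seg, p = q ++ '/' :: seg ∧ ∀ x ∈ seg, x ≠ '/' := by
  unfold pvTrim at h
  rcases hd : p.reverse.dropWhile (fun c => c ≠ '/') with _ | ⟨x, rest⟩ <;> rw [hd] at h
  · simp at h
  · simp only [Option.some.injEq] at h
    obtain ⟨T, hT⟩ : ∃ T, p.reverse.takeWhile (fun c => decide (c ≠ '/')) = T := ⟨_, rfl⟩
    have hx : x = '/' := drop_head_slash _ _ _ hd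
    have hsplit := List.takeWhile_append_dropWhile (p := fun c => decide (c ≠ '/')) (l := p.reverse)
    rw [hd, hT] at hsplit
    refine ⟨T.reverse, ?_, ?_⟩
    · have h2 := congrArg List.reverse hsplit
      rw [List.reverse_reverse, List.reverse_append, List.reverse_cons] at h2
      rw [← h2, ← h, hx, List.append_assoc]
      rfl
    · intro y hy
      have : y ∈ p.reverse.takeWhile (fun c => decide (c ≠ '/')) := by
        rw [hT]; exact List.mem_reverse.1 hy
      simpa using List.mem_takeWhile_imp this

theorem pv_prefix_len_eq {p a b : List Char} (ha : a <+: p) (hb : b <+: p)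
    (hl : a.length = b.length) : a = b := by
  rw [List.prefix_iff_eq_take] at ha hb
  rw [ha, hb, hl]

theorem pvMatches_trim_some {p q : List Char} (h : pvTrim p = some q) (c : List Char) :
    pvMatches p c = true ↔ c = p ∨ pvMatches q c = true := by
  obtain ⟨seg, hp, hseg⟩ := pvTrim_some_spec h
  have hqp : q <+: p := by rw [hp]; exact ⟨'/' :: seg, rfl⟩
  constructor
  · intro hm
    rcases (pvMatches_iff p c).1 hm with h1 | h1
    · exact Or.inl h1
    · right
      rcases Nat.lt_trichotomy c.length q.length with hlt | heq | hgt
      · exact (pvMatches_iff q c).2 (Or.inr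
          (List.prefix_of_prefix_length_le h1 hqp (by simp [hp]; omega)))
      · exact (pvMatches_iff q c).2 (Or.inl (pv_prefix_len_eq (pvMatches_prefix hm) hqp heq))
      · exfalso
        have hlen : c.length + 1 ≤ p.length := by simpa using h1.length_le
        have hplen : p.length = q.length + 1 + seg.length := by simp [hp]; omega
        have hb : c.length < p.length := by omega
        have hget := List.IsPrefix.getElem h1 (i := c.length) (by simp)
        have hL : (c ++ ['/'])[c.length]'(by simp) = '/' := by
          rw [List.getElem_append_right (le_refl c.length)]
          simp
        rw [hL] at hget
        -- p[c.length] lies inside seg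
        have hseg_idx : c.length - q.length - 1 < seg.length := by omega
        have hR : p[c.length]'hb = seg[c.length - q.length - 1]'hseg_idx := by
          subst hp
          rw [List.getElem_append_right (by omega)]
          rw [List.getElem_cons]
          simp only [dif_neg (by omega : ¬ (c.length - q.length = 0))]
        have hv : seg[c.length - q.length - 1]'hseg_idx = '/' := by rw [← hR]; exact hget.symm
        exact hseg _ (List.getElem_mem _) hv
  · rintro (h1 | h1)
    · subst h1; exact (pvMatches_iff c c).2 (Or.inl rfl)
    · rcases (pvMatches_iff q c).1 h1 with h2 | h2
      · subst h2
        exact (pvMatches_iff p c).2 (Or.inr (by rw [hp]; exact ⟨seg, by simp⟩))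
      · exact (pvMatches_iff p c).2 (Or.inr (h2.trans hqp))

theorem pvMatches_trim_none {p : List Char} (h : pvTrim p = none) (c : List Char) :
    pvMatches p c = true ↔ c = p := by
  constructor
  · intro hm
    rcases (pvMatches_iff p c).1 hm with h1 | h1
    · exact h1
    · exfalso
      have : '/' ∈ p := h1.subset (by simp)
      exact pvTrim_none_spec h _ this rfl
  · intro h1; subst h1; exact (pvMatches_iff c c).2 (Or.inl rfl)

theorem pvChain_mem (p c : List Char) : c ∈ pvChain p ↔ pvMatches p c = true := by
  rw [pvChain]
  rcases ht : pvTrim p with _ | q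
  · simp [pvMatches_trim_none ht]
  · have ih := pvChain_mem q c
    simp only [List.mem_cons, ih, pvMatches_trim_some ht]
termination_by p.length
decreasing_by exact pvTrim_lt ht

theorem pvChain_pairwise (p : List Char) :
    (pvChain p).Pairwise (fun a b => b.length < a.length) := by
  rw [pvChain]
  rcases ht : pvTrim p with _ | q
  · simp
  · refine List.Pairwise.cons ?_ (pvChain_pairwise q)
    intro b hb
    have : b <+: q := pvMatches_prefix ((pvChain_mem q b).1 hb)
    have := this.length_le
    have := pvTrim_lt ht
    omega
termination_by p.length
decreasing_by exact pvTrim_lt ht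

theorem pvDescend_eq_chain (mm : List (String × String)) (p : List Char) :
    pvDescend mm p =
      match (pvChain p).find? (fun c => (pvLookup mm c).isSome) with
      | some c => pvLookup mm c
      | none => none := by
  rw [pvDescend, pvChain]
  rcases hl : pvLookup mm p with _ | v
  · rcases ht : pvTrim p with _ | q
    · simp [List.find?_cons, hl]
    · have ih := pvDescend_eq_chain mm q
      simp [List.find?_cons, hl, ih]
  · simp [List.find?_cons, hl]
termination_by p.length
decreasing_by exact pvTrim_lt ht

-- first match in a pairwise-ordered list is maximal among matches
theorem pv_find_pairwise {α : Type} {R : α → α → Prop} {l : List α} {pred : α → Bool} {m : α}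
    (hp : l.Pairwise R) (hf : l.find? pred = some m) :
    ∀ x ∈ l, pred x = true → x = m ∨ R m x := by
  induction l with
  | nil => simp at hf
  | cons a l ih =>
    rcases List.pairwise_cons.1 hp with ⟨ha, hl⟩
    by_cases hpa : pred a = true
    · simp only [List.find?_cons, hpa, Option.some.injEq] at hf
      subst hf
      intro x hx _
      rcases List.mem_cons.1 hx with rfl | hx
      · exact Or.inl rfl
      · exact Or.inr (ha x hx)
    · simp only [List.find?_cons, Bool.not_eq_true] at hf
      rw [Bool.not_eq_true] at hpa
      rw [hpa] at hf
      intro x hx hpx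
      rcases List.mem_cons.1 hx with rfl | hx
      · rw [hpx] at hpa; exact absurd hpa (by simp)
      · exact ih hl hf x hx hpx

theorem pvLookup_isSome_iff (mm : List (String × String)) (c : List Char) :
    (pvLookup mm c).isSome = true ↔ c ∈ PySem.List.dedup (mm.map (fun q => q.1.toList)) := by
  rw [PySem.List.mem_dedup]
  simp [pvLookup, List.find?_isSome, List.mem_map]

theorem pv_core (mm : List (String × String)) (p : List Char) :
    (match (PySem.List.sorted (PySem.List.dedup (mm.map (fun q => q.1.toList)))
            (fun k => k.length) true).find? (fun m => pvMatches p m) with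
     | some m => pvLookup mm m
     | none => none) = pvDescend mm p := by
  rw [pvDescend_eq_chain]
  have hmemS : ∀ c, c ∈ PySem.List.sorted (PySem.List.dedup (mm.map (fun q => q.1.toList)))
      (fun k => k.length) true ↔ (pvLookup mm c).isSome = true := by
    intro c
    rw [PySem.List.mem_sorted, ← pvLookup_isSome_iff]
  rcases hA : (PySem.List.sorted (PySem.List.dedup (mm.map (fun q => q.1.toList)))
      (fun k => k.length) true).find? (fun m => pvMatches p m) with _ | m <;> rw [hA]
  · rcases hB : (pvChain p).find? (fun c => (pvLookup mm c).isSome) with _ | c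
    · rfl
    · exfalso
      have h1 : (pvLookup mm c).isSome = true := List.find?_some (p := fun c => (pvLookup mm c).isSome) hB
      have h2 : c ∈ pvChain p := List.mem_of_find?_eq_some hB
      have h3 : pvMatches p c = true := (pvChain_mem p c).1 h2
      have h4 := (List.find?_eq_none.1 hA) c ((hmemS c).2 h1)
      exact h4 h3
  · have hm1 : pvMatches p m = true := List.find?_some hA
    have hm2 : (pvLookup mm m).isSome = true := (hmemS m).1 (List.mem_of_find?_eq_some hA)
    have hm3 : m ∈ pvChain p := (pvChain_mem p m).2 hm1
    rcases hB : (pvChain p).find? (fun c => (pvLookup mm c).isSome) with _ | c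
    · exact absurd ((List.find?_eq_none.1 hB) m hm3) (by simp [hm2])
    · have hc1 : (pvLookup mm c).isSome = true := List.find?_some (p := fun c => (pvLookup mm c).isSome) hB
      have hc2 : c ∈ pvChain p := List.mem_of_find?_eq_some hB
      have hc3 : pvMatches p c = true := (pvChain_mem p c).1 hc2
      have hmaxA := pv_find_pairwise
        (PySem.List.sorted_pairwise_rev (PySem.List.dedup (mm.map (fun q => q.1.toList)))
          (fun k => k.length)) hA c ((hmemS c).2 hc1) hc3
      have hmaxB := pv_find_pairwise (pvChain_pairwise p) hB m hm3 hm2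
      have : m = c := by
        rcases hmaxA with rfl | hle
        · rfl
        · rcases hmaxB with rfl | hlt
          · rfl
          · omega
      show pvLookup mm m = pvLookup mm c
      rw [this]

theorem resolve_module_py_equal (path root_path : String) (mm : List (String × String)) :
    resolve_module_py path root_path mm = resolve_module_py_alt path root_path mm := by
  unfold resolve_module_py resolve_module_py_alt
  by_cases h : pvRstripSlash root_path.toList ≠ [] ∧ (pvLookup mm (pvRstripSlash root_path.toList)).isSome
  · rw [if_pos h, if_pos h]
  · rw [if_neg h, if_neg h]
    exact pv_core mm _

-- ===== VERDICT (by name: the statement is the Claim_ definition above) =====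
theorem resolve_module_py_spec : Claim_equal_resolve_module_py := by
  intro path root_path mount_map _
  unfold Spec_resolve_module_py
  exact resolve_module_py_equal path root_path mount_map
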